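-- pv_equiv track=rewrite | github.com/erbilen-tech/FPL_Data_Visualization | FPL_CSV_Converter/fpl_csv_converter.py | get_past_seasons
-- ===== SOURCE A (Python) =====
-- def get_past_seasons(pid, data, psc):
--     previous_pl_seasons = psc
--
--     # Variable declarations for summed past statistic headers
--     total_points, minutes, goals_scored, assists, clean_sheets, goals_conceded, own_goals = 0, 0, 0, 0, 0, 0, 0
--     penalties_saved, penalties_missed, yellow_cards, red_cards, saves, ea_index = 0, 0, 0, 0, 0, 0
--
--     # For all previous PL seasons...
--     for s in range(psc):
--         total_points += data['history_past'][s]['total_points']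
--         minutes += data['history_past'][s]['minutes']
--         goals_scored += data['history_past'][s]['goals_scored']
--         assists += data['history_past'][s]['assists']
--         clean_sheets += data['history_past'][s]['clean_sheets']
--         goals_conceded += data['history_past'][s]['goals_conceded']
--         own_goals += data['history_past'][s]['own_goals']
--         penalties_saved += data['history_past'][s]['penalties_saved']
--         penalties_missed += data['history_past'][s]['penalties_missed']
--         yellow_cards += data['history_past'][s]['yellow_cards']
--         red_cards += data['history_past'][s]['red_cards']
--         saves += data['history_past'][s]['saves']
--         ea_index += data['history_past'][s]['ea_index']
--
--     # Create JSON of overall past season stats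
--     past_season_data = {'total_points': total_points,
--                         'mins_played': minutes,
--                         'goals_scored': goals_scored,
--                         'assists': assists,
--                         'clean_sheets': clean_sheets,
--                         'goals_conceded': goals_conceded,
--                         'own_goals': own_goals,
--                         'penalties_saved': penalties_saved,
--                         'penalties_missed': penalties_missed,
--                         'yellow_cards': yellow_cards,
--                         'red_cards': red_cards,
--                         'saves': saves,
--                         'ea_index': ea_index,
--                         'previous_pl_seasons': previous_pl_seasons,
--                         'Player_pid': pid}
--
--     return past_season_data
-- ===== SOURCE B (Python) =====
-- _FIELDS = {'total_points': 'total_points',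
--            'mins_played': 'minutes',
--            'goals_scored': 'goals_scored',
--            'assists': 'assists',
--            'clean_sheets': 'clean_sheets',
--            'goals_conceded': 'goals_conceded',
--            'own_goals': 'own_goals',
--            'penalties_saved': 'penalties_saved',
--            'penalties_missed': 'penalties_missed',
--            'yellow_cards': 'yellow_cards',
--            'red_cards': 'red_cards',
--            'saves': 'saves',
--            'ea_index': 'ea_index'}
--
--
-- def get_past_seasons(pid, data, psc):
--     result = {out: sum(data['history_past'][s][src] for s in range(psc))
--               for out, src in _FIELDS.items()}
--     result['previous_pl_seasons'] = psc
--     result['Player_pid'] = pid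
--     return result
-- ===== Notes on version B (the rewrite author's own statement) =====
-- stated objective: idiomatic
-- what changed: Replaces A's one loop over seasons maintaining 13 hand-named accumulator variables by a table mapping each output key to its source stat and a per-field summation in a dict comprehension.
import Mathlib
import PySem

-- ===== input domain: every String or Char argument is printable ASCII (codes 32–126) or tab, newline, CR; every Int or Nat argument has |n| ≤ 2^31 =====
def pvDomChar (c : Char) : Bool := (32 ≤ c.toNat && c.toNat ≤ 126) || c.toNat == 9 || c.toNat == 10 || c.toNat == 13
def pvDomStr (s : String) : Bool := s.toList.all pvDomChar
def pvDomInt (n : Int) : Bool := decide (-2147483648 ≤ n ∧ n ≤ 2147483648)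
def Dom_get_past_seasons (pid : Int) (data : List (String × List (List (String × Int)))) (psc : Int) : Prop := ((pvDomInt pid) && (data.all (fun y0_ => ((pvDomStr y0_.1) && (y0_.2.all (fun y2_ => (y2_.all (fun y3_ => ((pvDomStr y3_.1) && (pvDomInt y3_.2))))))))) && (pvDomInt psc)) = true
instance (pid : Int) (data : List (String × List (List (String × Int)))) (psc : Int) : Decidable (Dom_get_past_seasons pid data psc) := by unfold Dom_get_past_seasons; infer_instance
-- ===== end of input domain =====

-- B replaces A's 13 hand-kept accumulator variables by a table of (output key, source stat)
-- pairs and one per-field summation; objective: idiomatic/alternative (no speed claim).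
-- ===== PORT A =====
-- first-match association-list lookup = Python dict lookup (none = KeyError)
def alget {α : Type} (l : List (String × α)) (k : String) : Option α :=
  (List.find? (fun kv => kv.1 == k) l).map (·.2)

-- data['history_past'][s][src]; the defaults are reached only outside Pre_ (where Python raises)
def histStat (data : List (String × List (List (String × Int)))) (s : Int) (src : String) : Int :=
  (alget (PySem.List.pyGetD ((alget data "history_past").getD []) s []) src).getD 0

def get_past_seasons (pid : Int) (data : List (String × List (List (String × Int)))) (psc : Int) : List (String × Int) :=
  let t : Int × Int × Int × Int × Int × Int × Int × Int × Int × Int × Int × Int × Int :=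
    (PySem.List.pyRange 0 psc 1).foldl
      (fun (t : Int × Int × Int × Int × Int × Int × Int × Int × Int × Int × Int × Int × Int) s =>
      (t.1 + histStat data s "total_points",
       t.2.1 + histStat data s "minutes",
       t.2.2.1 + histStat data s "goals_scored",
       t.2.2.2.1 + histStat data s "assists",
       t.2.2.2.2.1 + histStat data s "clean_sheets",
       t.2.2.2.2.2.1 + histStat data s "goals_conceded",
       t.2.2.2.2.2.2.1 + histStat data s "own_goals",
       t.2.2.2.2.2.2.2.1 + histStat data s "penalties_saved",
       t.2.2.2.2.2.2.2.2.1 + histStat data s "penalties_missed",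
       t.2.2.2.2.2.2.2.2.2.1 + histStat data s "yellow_cards",
       t.2.2.2.2.2.2.2.2.2.2.1 + histStat data s "red_cards",
       t.2.2.2.2.2.2.2.2.2.2.2.1 + histStat data s "saves",
       t.2.2.2.2.2.2.2.2.2.2.2.2 + histStat data s "ea_index"))
      (0, 0, 0, 0, 0, 0, 0, 0, 0, 0, 0, 0, 0)
  [("total_points", t.1),
   ("mins_played", t.2.1),
   ("goals_scored", t.2.2.1),
   ("assists", t.2.2.2.1),
   ("clean_sheets", t.2.2.2.2.1),
   ("goals_conceded", t.2.2.2.2.2.1),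
   ("own_goals", t.2.2.2.2.2.2.1),
   ("penalties_saved", t.2.2.2.2.2.2.2.1),
   ("penalties_missed", t.2.2.2.2.2.2.2.2.1),
   ("yellow_cards", t.2.2.2.2.2.2.2.2.2.1),
   ("red_cards", t.2.2.2.2.2.2.2.2.2.2.1),
   ("saves", t.2.2.2.2.2.2.2.2.2.2.2.1),
   ("ea_index", t.2.2.2.2.2.2.2.2.2.2.2.2),
   ("previous_pl_seasons", psc), ("Player_pid", pid)]

-- ===== PORT B =====
def pvFields : List (String × String) :=
  [("total_points", "total_points"), ("mins_played", "minutes"), ("goals_scored", "goals_scored"), ("assists", "assists"), ("clean_sheets", "clean_sheets"), ("goals_conceded", "goals_conceded"), ("own_goals", "own_goals"), ("penalties_saved", "penalties_saved"), ("penalties_missed", "penalties_missed"), ("yellow_cards", "yellow_cards"), ("red_cards", "red_cards"), ("saves", "saves"), ("ea_index", "ea_index")]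

def get_past_seasons_alt (pid : Int) (data : List (String × List (List (String × Int)))) (psc : Int) : List (String × Int) :=
  (pvFields.map (fun kv =>
    (kv.1, ((PySem.List.pyRange 0 psc 1).map (fun s => histStat data s kv.2)).sum)))
  ++ [("previous_pl_seasons", psc), ("Player_pid", pid)]

-- ===== PRECONDITION & SPEC =====
def pvSrcKeys : List String := ["total_points", "minutes", "goals_scored", "assists", "clean_sheets", "goals_conceded", "own_goals", "penalties_saved", "penalties_missed", "yellow_cards", "red_cards", "saves", "ea_index"]

-- Pre_ excludes exactly the inputs where Python A raises: psc > 0 with 'history_past'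
-- missing (KeyError), psc larger than the list (IndexError), or a stat key missing (KeyError).
def Pre_get_past_seasons (pid : Int) (data : List (String × List (List (String × Int)))) (psc : Int) : Prop :=
  psc ≤ 0 ∨
    ((alget data "history_past").isSome ∧
     psc ≤ (((alget data "history_past").getD []).length : Int) ∧
     ∀ d ∈ ((alget data "history_past").getD []).take psc.toNat,
       ∀ k ∈ pvSrcKeys, (alget d k).isSome)

instance (pid : Int) (data : List (String × List (List (String × Int)))) (psc : Int) : Decidable (Pre_get_past_seasons pid data psc) := by
  unfold Pre_get_past_seasons; infer_instance

def pvWitness_get_past_seasons : Int × (List (String × List (List (String × Int)))) × Int :=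
  (7, [("history_past", [[("total_points", 1), ("minutes", 2), ("goals_scored", 3), ("assists", 4), ("clean_sheets", 5), ("goals_conceded", 6), ("own_goals", 7), ("penalties_saved", 8), ("penalties_missed", 9), ("yellow_cards", 10), ("red_cards", 11), ("saves", 12), ("ea_index", 13)]])], 1)

def Spec_get_past_seasons (pid : Int) (data : List (String × List (List (String × Int)))) (psc : Int) (out : List (String × Int)) : Prop := out = get_past_seasons_alt pid data psc
instance (pid : Int) (data : List (String × List (List (String × Int)))) (psc : Int) (out : List (String × Int)) : Decidable (Spec_get_past_seasons pid data psc out) := by unfold Spec_get_past_seasons; infer_instance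

-- ===== CLAIM (what is proved, stated in full; the proofs are below) =====
def Claim_equal_get_past_seasons : Prop := ∀ (pid : Int) (data : List (String × List (List (String × Int)))) (psc : Int), Dom_get_past_seasons pid data psc → Pre_get_past_seasons pid data psc → Spec_get_past_seasons pid data psc (get_past_seasons pid data psc)

-- ===== LEMMAS AND PROOFS =====
-- A's 13-accumulator loop computed componentwise: each slot is its start plus a per-field sum.
theorem loopA (data : List (String × List (List (String × Int)))) (l : List Int)
    (a1 a2 a3 a4 a5 a6 a7 a8 a9 a10 a11 a12 a13 : Int) :
    l.foldl
      (fun (t : Int × Int × Int × Int × Int × Int × Int × Int × Int × Int × Int × Int × Int) s =>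
      (t.1 + histStat data s "total_points",
       t.2.1 + histStat data s "minutes",
       t.2.2.1 + histStat data s "goals_scored",
       t.2.2.2.1 + histStat data s "assists",
       t.2.2.2.2.1 + histStat data s "clean_sheets",
       t.2.2.2.2.2.1 + histStat data s "goals_conceded",
       t.2.2.2.2.2.2.1 + histStat data s "own_goals",
       t.2.2.2.2.2.2.2.1 + histStat data s "penalties_saved",
       t.2.2.2.2.2.2.2.2.1 + histStat data s "penalties_missed",
       t.2.2.2.2.2.2.2.2.2.1 + histStat data s "yellow_cards",
       t.2.2.2.2.2.2.2.2.2.2.1 + histStat data s "red_cards",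
       t.2.2.2.2.2.2.2.2.2.2.2.1 + histStat data s "saves",
       t.2.2.2.2.2.2.2.2.2.2.2.2 + histStat data s "ea_index"))
      (a1, a2, a3, a4, a5, a6, a7, a8, a9, a10, a11, a12, a13)
    = (a1 + (l.map (fun s => histStat data s "total_points")).sum,
     a2 + (l.map (fun s => histStat data s "minutes")).sum,
     a3 + (l.map (fun s => histStat data s "goals_scored")).sum,
     a4 + (l.map (fun s => histStat data s "assists")).sum,
     a5 + (l.map (fun s => histStat data s "clean_sheets")).sum,
     a6 + (l.map (fun s => histStat data s "goals_conceded")).sum,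
     a7 + (l.map (fun s => histStat data s "own_goals")).sum,
     a8 + (l.map (fun s => histStat data s "penalties_saved")).sum,
     a9 + (l.map (fun s => histStat data s "penalties_missed")).sum,
     a10 + (l.map (fun s => histStat data s "yellow_cards")).sum,
     a11 + (l.map (fun s => histStat data s "red_cards")).sum,
     a12 + (l.map (fun s => histStat data s "saves")).sum,
     a13 + (l.map (fun s => histStat data s "ea_index")).sum) := by
  induction l generalizing a1 a2 a3 a4 a5 a6 a7 a8 a9 a10 a11 a12 a13 with
  | nil => simp
  | cons x xs ih => simp [List.foldl_cons, ih, add_assoc]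

-- ===== VERDICT (by name: the statement is the Claim_ definition above) =====
theorem get_past_seasons_spec : Claim_equal_get_past_seasons := by
  intro pid data psc _ _
  unfold Spec_get_past_seasons get_past_seasons get_past_seasons_alt
  rw [loopA]
  simp [pvFields]
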